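-- pv_equiv track=rewrite | github.com/hackclub/podium | agent-plans/postgres-migration/drafts/merge_airtable_users.py | replace_user_in_list
-- ===== SOURCE A (Python) =====
-- def replace_user_in_list(user_list: list[str], old_id: str, new_id: str, deleted_users: set[str]) -> list[str] | None:
--     """Replace old_id with new_id in a list, avoiding duplicates. Returns None if no change."""
--     if old_id not in user_list:
--         return None
--
--     result = [new_id if uid == old_id else uid for uid in user_list]
--     # Remove duplicates and already-deleted users while preserving order
--     seen = set()
--     deduped = []
--     for uid in result:
--         if uid not in seen and uid not in deleted_users:
--             seen.add(uid)
--             deduped.append(uid)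
--     return deduped
-- ===== SOURCE B (Python) =====
-- def replace_user_in_list(user_list: list[str], old_id: str, new_id: str, deleted_users: set[str]) -> list[str] | None:
--     """Replace old_id with new_id in a list, avoiding duplicates. Returns None if no change."""
--     found = False
--     seen = set()
--     deduped = []
--     for uid in user_list:
--         if uid == old_id:
--             found = True
--             uid = new_id
--         if uid not in seen and uid not in deleted_users:
--             seen.add(uid)
--             deduped.append(uid)
--     return deduped if found else None
-- ===== Notes on version B (the rewrite author's own statement) =====
-- stated objective: alternative
-- what changed: B fuses A's three sequential passes (membership pre-check, replacement comprehension, dedup loop) into a single traversal maintaining a found flag alongside the seen-set and output list.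
import Mathlib
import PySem

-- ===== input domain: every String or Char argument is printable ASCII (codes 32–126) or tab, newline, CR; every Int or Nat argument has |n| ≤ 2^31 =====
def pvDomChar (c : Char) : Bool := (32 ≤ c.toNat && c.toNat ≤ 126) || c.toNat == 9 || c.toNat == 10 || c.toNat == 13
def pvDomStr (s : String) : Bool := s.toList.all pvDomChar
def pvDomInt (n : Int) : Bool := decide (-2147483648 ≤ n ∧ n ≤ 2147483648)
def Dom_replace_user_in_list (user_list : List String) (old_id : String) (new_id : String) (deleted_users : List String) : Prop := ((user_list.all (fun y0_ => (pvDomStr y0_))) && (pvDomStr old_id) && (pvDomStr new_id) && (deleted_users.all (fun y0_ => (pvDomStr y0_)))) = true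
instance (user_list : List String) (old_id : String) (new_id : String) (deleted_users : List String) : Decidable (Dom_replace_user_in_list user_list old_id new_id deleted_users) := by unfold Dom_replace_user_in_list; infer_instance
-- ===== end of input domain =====

-- B fuses A's three sequential passes (membership check, replacement map, dedup loop) into one traversal with a `found` flag; same O(n) cost, proved equal on all inputs.

-- ===== PORT A =====
def replace_user_in_list (user_list : List String) (old_id : String) (new_id : String) (deleted_users : List String) : Option (List String) :=
  if ¬ user_list.contains old_id then none
  else
    let result := user_list.map (fun uid => if uid == old_id then new_id else uid)
    let st := result.foldl (fun (st : PySem.Set String × List String) uid =>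
      if !(PySem.Set.contains st.1 uid) && !(deleted_users.contains uid) then
        (PySem.Set.add st.1 uid, st.2 ++ [uid])
      else st) (PySem.Set.empty, [])
    some st.2

-- ===== PORT B =====
def replace_user_in_list_alt (user_list : List String) (old_id : String) (new_id : String) (deleted_users : List String) : Option (List String) :=
  let st := user_list.foldl (fun (st : Bool × PySem.Set String × List String) uid0 =>
    let found := st.1 || (uid0 == old_id)
    let uid := if uid0 == old_id then new_id else uid0
    if !(PySem.Set.contains st.2.1 uid) && !(deleted_users.contains uid) then
      (found, PySem.Set.add st.2.1 uid, st.2.2 ++ [uid])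
    else (found, st.2.1, st.2.2)) (false, PySem.Set.empty, [])
  if st.1 then some st.2.2 else none

-- ===== PRECONDITION & SPEC =====
def Spec_replace_user_in_list (user_list : List String) (old_id : String) (new_id : String) (deleted_users : List String) (out : Option (List String)) : Prop := out = replace_user_in_list_alt user_list old_id new_id deleted_users
instance (user_list : List String) (old_id : String) (new_id : String) (deleted_users : List String) (out : Option (List String)) : Decidable (Spec_replace_user_in_list user_list old_id new_id deleted_users out) := by unfold Spec_replace_user_in_list; infer_instance

-- ===== CLAIM (what is proved, stated in full; the proofs are below) =====
def Claim_equal_replace_user_in_list : Prop := ∀ (user_list : List String) (old_id : String) (new_id : String) (deleted_users : List String), Dom_replace_user_in_list user_list old_id new_id deleted_users → Spec_replace_user_in_list user_list old_id new_id deleted_users (replace_user_in_list user_list old_id new_id deleted_users)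

-- ===== LEMMAS AND PROOFS =====

-- B's fused fold decomposes into the found-flag (membership of old_id) and A's dedup fold run on the mapped list.
theorem foldB_decompose (old_id new_id : String) (deleted_users : List String) :
    ∀ (ul : List String) (found : Bool) (seen : PySem.Set String) (ded : List String),
      ul.foldl (fun (st : Bool × PySem.Set String × List String) uid0 =>
        let found := st.1 || (uid0 == old_id)
        let uid := if uid0 == old_id then new_id else uid0
        if !(PySem.Set.contains st.2.1 uid) && !(deleted_users.contains uid) then
          (found, PySem.Set.add st.2.1 uid, st.2.2 ++ [uid])
        else (found, st.2.1, st.2.2)) (found, seen, ded)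
      = (found || ul.contains old_id,
         (ul.map (fun uid => if uid == old_id then new_id else uid)).foldl
           (fun (st : PySem.Set String × List String) uid =>
             if !(PySem.Set.contains st.1 uid) && !(deleted_users.contains uid) then
               (PySem.Set.add st.1 uid, st.2 ++ [uid])
             else st) (seen, ded)) := by
  intro ul
  induction ul with
  | nil => intro found seen ded; simp
  | cons x xs ih =>
    intro found seen ded
    simp only [List.foldl_cons, List.map_cons, List.contains_cons]
    by_cases hc : !(PySem.Set.contains seen (if x == old_id then new_id else x))
        && !(deleted_users.contains (if x == old_id then new_id else x))
    · simp only [hc, if_pos, ih]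
      rw [Bool.or_assoc, BEq.comm (a := x) (b := old_id)]
    · simp only [hc, if_neg, Bool.false_eq_true, not_false_iff, ih]
      rw [Bool.or_assoc, BEq.comm (a := x) (b := old_id)]

-- ===== VERDICT (by name: the statement is the Claim_ definition above) =====
theorem replace_user_in_list_spec : Claim_equal_replace_user_in_list := by
  intro ul old_id new_id del _
  show replace_user_in_list ul old_id new_id del = replace_user_in_list_alt ul old_id new_id del
  unfold replace_user_in_list replace_user_in_list_alt
  rw [foldB_decompose]
  cases h : ul.contains old_id
  · simp
  · simp
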